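-- pv_equiv track=rewrite | github.com/Alexyei/Python | Практические работы 2 семестр/отчёты отправленные по почте/ЗБ-ПИ1-1 Белоусов Строки.py | toDoubleCesar
-- ===== SOURCE A (Python) =====
-- import string
--
-- def toDoubleCesar(str, k1, k2):
--     alphabet = string.ascii_lowercase + string.digits
--     result = ""
--     k1 %= len(alphabet)
--     k2 %= len(alphabet)
--
--     for i in range(len(str)):
--         char = str[i]
--         index = alphabet.find(char)
--         if index != -1:
--             result += alphabet[(index + (k1, k2)[i % 2]) % len(alphabet)];
--             continue
--         index = alphabet.find(char)
--         if index != -1: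
--             result += alphabet[(index + (k1, k2)[i % 2]) % len(alphabet)];
--             continue
--         result += char
--
--     return result
-- ===== SOURCE B (Python) =====
-- import string
--
-- def toDoubleCesar(str, k1, k2):
--     alphabet = string.ascii_lowercase + string.digits
--     k1 %= len(alphabet)
--     k2 %= len(alphabet)
--     t1 = "".maketrans(alphabet, alphabet[k1:] + alphabet[:k1])
--     t2 = "".maketrans(alphabet, alphabet[k2:] + alphabet[:k2])
--     even = str[0::2].translate(t1)
--     odd = str[1::2].translate(t2)
--     parts = []
--     for e, o in zip(even, odd):
--         parts.append(e)
--         parts.append(o)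
--     if len(even) > len(odd):
--         parts.append(even[-1])
--     return "".join(parts)
-- ===== Notes on version B (the rewrite author's own statement) =====
-- stated objective: faster
-- what changed: Replaces the per-index loop that scans the alphabet with alphabet.find for every character by two precomputed str.maketrans translation tables applied to the even- and odd-position slices, interleaved back in order.
import Mathlib
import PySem

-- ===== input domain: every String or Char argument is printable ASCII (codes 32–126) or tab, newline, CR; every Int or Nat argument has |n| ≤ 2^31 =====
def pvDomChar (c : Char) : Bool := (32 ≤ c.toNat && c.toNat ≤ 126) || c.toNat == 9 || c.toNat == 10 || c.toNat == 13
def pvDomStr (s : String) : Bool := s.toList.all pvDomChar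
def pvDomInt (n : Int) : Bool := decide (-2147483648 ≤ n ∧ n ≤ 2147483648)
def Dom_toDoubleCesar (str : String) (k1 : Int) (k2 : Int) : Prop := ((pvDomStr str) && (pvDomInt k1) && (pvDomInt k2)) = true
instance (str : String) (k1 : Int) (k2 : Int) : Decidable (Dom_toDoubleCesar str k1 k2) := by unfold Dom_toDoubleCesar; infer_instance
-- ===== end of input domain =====

-- B replaces the per-index alphabet.find loop by two precomputed translation tables applied to the
-- even-/odd-position slices, interleaved back in order (measured faster: table lookup instead of an
-- alphabet scan per character).

-- ===== PORT A =====
-- string.ascii_lowercase + string.digits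
def pvAlpha : List Char := "abcdefghijklmnopqrstuvwxyz0123456789".toList

def toDoubleCesar (str : String) (k1 : Int) (k2 : Int) : String :=
  let alphabet := pvAlpha
  let k1 := PySem.Int.mod k1 (alphabet.length : Int)
  let k2 := PySem.Int.mod k2 (alphabet.length : Int)
  let cs := str.toList
  let result : List Char := (PySem.List.pyRange 0 (cs.length : Int)).foldl
    (fun result i =>
      let char := (PySem.List.pyGet? cs i).getD ' '   -- i ∈ range(len(str)): index always valid
      let index := PySem.Chars.find alphabet [char]
      if index ≠ -1 then
        result ++ [(PySem.List.pyGet? alphabet (PySem.Int.mod (index + (if PySem.Int.mod i 2 = 0 then k1 else k2)) (alphabet.length : Int))).getD ' ']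
      else
        -- the Python repeats the identical (dead) check; transliterated as-is
        let index := PySem.Chars.find alphabet [char]
        if index ≠ -1 then
          result ++ [(PySem.List.pyGet? alphabet (PySem.Int.mod (index + (if PySem.Int.mod i 2 = 0 then k1 else k2)) (alphabet.length : Int))).getD ' ']
        else
          result ++ [char]) []
  String.ofList result

-- ===== PORT B =====
-- "".maketrans(ks, vs): a char→char mapping table (exact for equal-length ASCII arguments)
def pvMaketrans (ks vs : List Char) : PySem.Dict Char Char :=
  (ks.zip vs).foldl (fun d p => d.insert p.1 p.2) PySem.Dict.empty
-- s.translate(t): chars in the table are mapped, all others pass through unchanged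
def pvTranslate (t : PySem.Dict Char Char) (s : List Char) : List Char :=
  s.map (fun c => (PySem.Dict.get? t c).getD c)

def toDoubleCesar_alt (str : String) (k1 : Int) (k2 : Int) : String :=
  let alphabet := pvAlpha
  let k1 := PySem.Int.mod k1 (alphabet.length : Int)
  let k2 := PySem.Int.mod k2 (alphabet.length : Int)
  let t1 := pvMaketrans alphabet (PySem.List.slice alphabet (some k1) none ++ PySem.List.slice alphabet none (some k1))
  let t2 := pvMaketrans alphabet (PySem.List.slice alphabet (some k2) none ++ PySem.List.slice alphabet none (some k2))
  let cs := str.toList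
  let even := pvTranslate t1 ((PySem.List.slice? cs (some 0) none 2).getD [])   -- str[0::2]: step 2 ≠ 0, slice? is `some`
  let odd  := pvTranslate t2 ((PySem.List.slice? cs (some 1) none 2).getD [])   -- str[1::2]
  let parts := (even.zip odd).foldl (fun acc p => acc ++ [p.1] ++ [p.2]) []
  let parts := if odd.length < even.length then parts ++ [(PySem.List.pyGet? even (-1)).getD ' '] else parts  -- even[-1]: even nonempty here
  String.ofList parts

-- ===== PRECONDITION & SPEC =====
def Spec_toDoubleCesar (str : String) (k1 : Int) (k2 : Int) (out : String) : Prop := out = toDoubleCesar_alt str k1 k2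
instance (str : String) (k1 : Int) (k2 : Int) (out : String) : Decidable (Spec_toDoubleCesar str k1 k2 out) := by unfold Spec_toDoubleCesar; infer_instance

-- ===== CLAIM (what is proved, stated in full; the proofs are below) =====
def Claim_equal_toDoubleCesar : Prop := ∀ (str : String) (k1 : Int) (k2 : Int), Dom_toDoubleCesar str k1 k2 → Spec_toDoubleCesar str k1 k2 (toDoubleCesar str k1 k2)

-- ===== LEMMAS AND PROOFS =====

-- proof-side vocabulary: even-position sublist, interleave, alternating map, per-char actions
def pvEvens {α : Type} : List α → List α
  | [] => []
  | [a] => [a]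
  | a :: _ :: r => a :: pvEvens r

def pvInter {α : Type} : List α → List α → List α
  | [], ys => ys
  | x :: xs, [] => x :: xs
  | x :: xs, y :: ys => x :: y :: pvInter xs ys

def pvZZ (f g : Char → Char) : List Char → List Char
  | [] => []
  | a :: r => f a :: pvZZ g f r

-- A's per-character action at shift k
def pvStepA (k : Int) (c : Char) : Char :=
  if PySem.Chars.find pvAlpha [c] ≠ -1 then
    (PySem.List.pyGet? pvAlpha (PySem.Int.mod (PySem.Chars.find pvAlpha [c] + k) (pvAlpha.length : Int))).getD ' '
  else c

-- the rotated alphabet B's table maps onto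
def pvRotOf (k : Int) : List Char :=
  PySem.List.slice pvAlpha (some k) none ++ PySem.List.slice pvAlpha none (some k)

-- B's per-character action at shift k
def pvStepB (k : Int) (c : Char) : Char :=
  (PySem.Dict.get? (pvMaketrans pvAlpha (pvRotOf k)) c).getD c

lemma key36 : ∀ (j m : Fin 36),
    (pvRotOf ((m : Nat) : Int)).getD (j : Nat) ' ' =
      (PySem.List.pyGet? pvAlpha (PySem.Int.mod (((j : Nat) : Int) + ((m : Nat) : Int)) (pvAlpha.length : Int))).getD ' ' := by
  decide

lemma pvEvens_length {α : Type} : ∀ (l : List α), (pvEvens l).length = (l.length + 1) / 2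
  | [] => by simp [pvEvens]
  | [a] => by simp [pvEvens]
  | a :: b :: r => by simp [pvEvens, pvEvens_length r]; omega

lemma pvEvens_cons_tail {α : Type} (b : α) (r : List α) : pvEvens (b :: r) = b :: pvEvens r.tail := by
  cases r <;> simp [pvEvens]

lemma fmNat {α : Type} : ∀ (cs : List α),
    List.filterMap (fun x => cs[2 * x]?) (List.range ((cs.length + 1) / 2)) = pvEvens cs
  | [] => by simp [pvEvens]
  | [a] => by simp [pvEvens]
  | a :: b :: r => by
    have hc : ((a :: b :: r).length + 1) / 2 = (r.length + 1) / 2 + 1 := by simp; omega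
    rw [hc, List.range_succ_eq_map, List.filterMap_cons, List.filterMap_map]
    have h0 : (a :: b :: r)[2 * 0]? = some a := by simp
    rw [h0]
    have hfun : ((fun x => (a :: b :: r)[2 * x]?) ∘ Nat.succ) = fun x => r[2 * x]? := by
      funext x
      show (a :: b :: r)[2 * (x+1)]? = r[2 * x]?
      rw [show 2 * (x+1) = (2*x) + 1 + 1 by omega]
      simp
    rw [hfun, fmNat r]
    simp [pvEvens]

lemma fmNat1 {α : Type} : ∀ (cs : List α),
    List.filterMap (fun x => cs[1 + 2 * x]?) (List.range (cs.length / 2)) = pvEvens cs.tail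
  | [] => by simp [pvEvens]
  | [a] => by simp [pvEvens]
  | a :: b :: r => by
    have hc : (a :: b :: r).length / 2 = r.length / 2 + 1 := by simp; omega
    rw [hc, List.range_succ_eq_map, List.filterMap_cons, List.filterMap_map]
    have h0 : (a :: b :: r)[1 + 2 * 0]? = some b := by simp
    rw [h0]
    have hfun : ((fun x => (a :: b :: r)[1 + 2 * x]?) ∘ Nat.succ) = fun x => r[1 + 2 * x]? := by
      funext x
      show (a :: b :: r)[1 + 2 * (x+1)]? = r[1 + 2 * x]?
      rw [show 1 + 2 * (x+1) = (1 + 2*x) + 1 + 1 by omega]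
      simp
    rw [hfun, fmNat1 r]
    show (b :: pvEvens r.tail : List α) = pvEvens (a :: b :: r).tail
    simp [pvEvens_cons_tail]

lemma slice_even {α : Type} (cs : List α) : PySem.List.slice? cs (some 0) none 2 = some (pvEvens cs) := by
  simp only [PySem.List.slice?, PySem.List.sliceIndices]
  norm_num
  have hc : (if 0 < cs.length then (((cs.length : Int) + 2 - 1) / 2).toNat else 0) = (cs.length + 1) / 2 := by split_ifs <;> omega
  rw [hc]
  have hfun : (fun x : Nat => cs[(2 * (x:Int)).toNat]?) = fun x => cs[2 * x]? := by
    funext x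
    have h : ((2 * (x:Int)).toNat) = 2 * x := by omega
    rw [h]
  rw [hfun]
  exact fmNat cs

lemma slice_odd {α : Type} (cs : List α) : PySem.List.slice? cs (some 1) none 2 = some (pvEvens cs.tail) := by
  simp only [PySem.List.slice?, PySem.List.sliceIndices]
  norm_num
  rcases cs with _ | ⟨a, r⟩
  · simp [pvEvens]
  · have hmin : min 1 ((a::r).length : Int) = 1 := by simp
    rw [hmin]
    have hc : (if 1 < (a::r).length then (((a::r).length : Int) - 1 + 2 - 1) / 2 |>.toNat else 0) = (a::r).length / 2 := by
      split_ifs <;> simp_all <;> omega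
    rw [hc]
    have hfun : (fun x : Nat => (a::r)[(1 + 2 * (x:Int)).toNat]?) = fun x => (a::r)[1 + 2 * x]? := by
      funext x
      have h : ((1 + 2 * (x:Int)).toNat) = 1 + 2 * x := by omega
      rw [h]
    rw [hfun]
    exact fmNat1 (a::r)

lemma pyGet_neg_one {α : Type} (xs : List α) :
    PySem.List.pyGet? xs (-1) = xs.getLast? := by
  rcases xs with _ | ⟨a, r⟩
  · simp [PySem.List.pyGet?, PySem.List.pyIdx?]
  · have hidx : PySem.List.pyIdx? (r.length + 1) (-1) = some r.length := by
      simp [PySem.List.pyIdx?]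
    simp [PySem.List.pyGet?, hidx, List.getLast?_eq_getElem?]

lemma inter_spec {α : Type} (d : α) : ∀ (xs ys : List α), ys.length ≤ xs.length → xs.length ≤ ys.length + 1 →
    (if ys.length < xs.length then
      (xs.zip ys).flatMap (fun p => [p.1, p.2]) ++ [((PySem.List.pyGet? xs (-1)).getD d)]
     else (xs.zip ys).flatMap (fun p => [p.1, p.2])) = pvInter xs ys
  | [], ys, h1, h2 => by
    have hy : ys = [] := by cases ys with | nil => rfl | cons a t => simp at h1
    subst hy; simp [pvInter]
  | [x], [], _, _ => by
    simp [pvInter, pyGet_neg_one]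
  | x :: x' :: xs, [], h1, h2 => by simp at h2
  | x :: xs, y :: ys, h1, h2 => by
    simp only [List.length_cons] at h1 h2
    have h1' : ys.length ≤ xs.length := by omega
    have h2' : xs.length ≤ ys.length + 1 := by omega
    have ih := inter_spec d xs ys h1' h2'
    simp only [List.zip_cons_cons, List.flatMap_cons, List.length_cons]
    by_cases hlt : ys.length < xs.length
    · rw [if_pos hlt] at ih
      rw [if_pos (show ys.length + 1 < xs.length + 1 by omega)]
      have hget : PySem.List.pyGet? (x :: xs) (-1) = PySem.List.pyGet? xs (-1) := by
        rw [pyGet_neg_one, pyGet_neg_one]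
        rcases xs with _ | ⟨a, r⟩
        · simp at hlt
        · simp
      rw [hget]
      simp [pvInter, ← ih]
    · rw [if_neg hlt] at ih
      rw [if_neg (show ¬ (ys.length + 1 < xs.length + 1) by omega)]
      simp [pvInter, ← ih]

lemma inter_zz : ∀ (cs : List Char) (f g : Char → Char),
    pvInter ((pvEvens cs).map f) ((pvEvens cs.tail).map g) = pvZZ f g cs
  | [], _, _ => by simp [pvEvens, pvInter, pvZZ]
  | [a], f, g => by simp [pvEvens, pvInter, pvZZ]
  | a :: b :: r, f, g => by
    have h1 : pvEvens (a :: b :: r) = a :: pvEvens r := rfl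
    have h2 : pvEvens (a :: b :: r).tail = b :: pvEvens r.tail := by
      simpa using pvEvens_cons_tail b r
    rw [h1, h2]
    simp only [List.map_cons, pvInter, pvZZ]
    rw [inter_zz r f g]

lemma map_range_zz : ∀ (cs : List Char) (f g : Char → Char),
    (List.range cs.length).map (fun i => (if i % 2 = 0 then f else g) ((cs[i]?).getD ' ')) = pvZZ f g cs
  | [], _, _ => by simp [pvZZ]
  | a :: r, f, g => by
    rw [List.length_cons, List.range_succ_eq_map, List.map_cons, List.map_map]
    have h0 : ((fun i => (if i % 2 = 0 then f else g) (((a :: r)[i]?).getD ' ')) 0) = f a := by simp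
    have hfun : ((fun i => (if i % 2 = 0 then f else g) (((a :: r)[i]?).getD ' ')) ∘ Nat.succ)
        = fun i => (if i % 2 = 0 then g else f) ((r[i]?).getD ' ') := by
      funext i
      show (if (i + 1) % 2 = 0 then f else g) (((a :: r)[i + 1]?).getD ' ') = _
      by_cases hp : i % 2 = 0
      · rw [if_neg (by omega), if_pos hp]; simp
      · rw [if_pos (by omega), if_neg hp]; simp
    rw [hfun, map_range_zz r g f]
    simp [pvZZ]

lemma zz_congr (f f' g g' : Char → Char) (hf : ∀ c, f c = f' c) (hg : ∀ c, g c = g' c) :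
    ∀ cs, pvZZ f g cs = pvZZ f' g' cs
  | [] => rfl
  | a :: r => by simp only [pvZZ, hf a, zz_congr g g' f f' hg hf r]

lemma go_singleton (c : Char) : ∀ (l : List Char) (k : Nat),
    PySem.Chars.find.go [c] l k =
      (match l.findIdx? (fun x => x == c) with
       | some j => ((k + j : Nat) : Int)
       | none => -1)
  | [], k => by simp [PySem.Chars.find.go]
  | h :: t, k => by
    rw [PySem.Chars.find.go]
    have hpre : [c].isPrefixOf (h :: t) = (c == h) := by
      simp [List.isPrefixOf]
    rw [hpre, List.findIdx?_cons]
    by_cases he : c = h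
    · subst he; simp
    · have h1 : (c == h) = false := by simpa using he
      have h2 : (h == c) = false := by simpa using Ne.symm he
      rw [h1, h2]
      simp only [Bool.false_eq_true, if_false]
      rw [go_singleton c t (k + 1)]
      cases hfi : t.findIdx? (fun x => x == c) <;> simp [hfi] <;> push_cast <;> ring

lemma find?_zip (c : Char) : ∀ (ks vs : List Char), ks.length ≤ vs.length →
    Option.map Prod.snd (List.find? (fun p => p.1 == c) (ks.zip vs)) =
      (ks.findIdx? (fun x => x == c)).map (fun j => vs.getD j ' ')
  | [], vs, _ => by simp
  | k :: ks, [], h => by simp at h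
  | k :: ks, v :: vs, h => by
    simp only [List.length_cons] at h
    rw [List.zip_cons_cons, List.find?_cons, List.findIdx?_cons]
    by_cases hk : k == c
    · simp [hk]
    · simp only [hk, Bool.false_eq_true, if_false]
      rw [find?_zip c ks vs (by omega)]
      cases ks.findIdx? (fun x => x == c) <;> simp

lemma rot_length (k : Int) (hk0 : 0 ≤ k) (hk : k < 36) : (pvRotOf k).length = 36 := by
  unfold pvRotOf
  rw [PySem.List.slice_from _ hk0, PySem.List.slice_to _ hk0]
  have : pvAlpha.length = 36 := by decide
  simp [this]
  omega

lemma step_eq (k : Int) (hk0 : 0 ≤ k) (hk : k < 36) (c : Char) : pvStepB k c = pvStepA k c := by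
  have hlen : pvAlpha.length = 36 := by decide
  have hrl : (pvRotOf k).length = 36 := rot_length k hk0 hk
  -- items of the translation table are exactly the zipped pairs
  have hitems : (pvMaketrans pvAlpha (pvRotOf k)).items = pvAlpha.zip (pvRotOf k) := by
    unfold pvMaketrans
    have := PySem.Dict.items_foldl_insert_fresh (l := pvAlpha.zip (pvRotOf k))
      (k := Prod.fst) (v := Prod.snd) (d := PySem.Dict.empty)
      (by intro a _; simp [PySem.Dict.contains_empty])
      (by rw [List.map_fst_zip (by omega)]; decide)
    simpa using this
  have hget : PySem.Dict.get? (pvMaketrans pvAlpha (pvRotOf k)) c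
      = (pvAlpha.findIdx? (fun x => x == c)).map (fun j => (pvRotOf k).getD j ' ') := by
    show Option.map Prod.snd (List.find? (fun p => p.1 == c) (pvMaketrans pvAlpha (pvRotOf k)).items) = _
    rw [hitems]
    exact find?_zip c pvAlpha (pvRotOf k) (by omega)
  have hfind : PySem.Chars.find pvAlpha [c]
      = (match pvAlpha.findIdx? (fun x => x == c) with
         | some j => ((j : Nat) : Int)
         | none => -1) := by
    show PySem.Chars.find.go [c] pvAlpha 0 = _
    rw [go_singleton]
    cases pvAlpha.findIdx? (fun x => x == c) <;> simp
  unfold pvStepB pvStepA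
  cases hfi : pvAlpha.findIdx? (fun x => x == c) with
  | none =>
    rw [hget, hfi]
    rw [hfind, hfi]
    simp
  | some j =>
    have hj : j < 36 := by
      have := (List.findIdx?_eq_some_iff_findIdx_eq.mp hfi).1
      omega
    rw [hget, hfi, hfind, hfi]
    have hm : k = ((k.toNat : Nat) : Int) := by omega
    have hmlt : k.toNat < 36 := by omega
    have hkey := key36 ⟨j, hj⟩ ⟨k.toNat, hmlt⟩
    rw [if_pos (by omega : ((j:Nat):Int) ≠ -1)]
    simp only [Option.map_some, Option.getD_some]
    rw [hm]
    simpa using hkey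

lemma A_norm (str : String) (k1 k2 : Int) :
    toDoubleCesar str k1 k2 =
      String.ofList (pvZZ (pvStepA (PySem.Int.mod k1 36)) (pvStepA (PySem.Int.mod k2 36)) str.toList) := by
  have h36 : ((pvAlpha.length : Nat) : Int) = 36 := by decide
  simp only [toDoubleCesar, h36]
  congr 1
  rw [PySem.List.pyRange_zero_natCast, List.foldl_map]
  have hbody : (fun (acc : List Char) (y : Nat) =>
      if PySem.Chars.find pvAlpha [(PySem.List.pyGet? str.toList ((y : Nat) : Int)).getD ' '] ≠ -1 then
        acc ++ [(PySem.List.pyGet? pvAlpha (PySem.Int.mod (PySem.Chars.find pvAlpha [(PySem.List.pyGet? str.toList ((y : Nat) : Int)).getD ' '] + if PySem.Int.mod ((y : Nat) : Int) 2 = 0 then PySem.Int.mod k1 36 else PySem.Int.mod k2 36) 36)).getD ' ']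
      else
        if PySem.Chars.find pvAlpha [(PySem.List.pyGet? str.toList ((y : Nat) : Int)).getD ' '] ≠ -1 then
          acc ++ [(PySem.List.pyGet? pvAlpha (PySem.Int.mod (PySem.Chars.find pvAlpha [(PySem.List.pyGet? str.toList ((y : Nat) : Int)).getD ' '] + if PySem.Int.mod ((y : Nat) : Int) 2 = 0 then PySem.Int.mod k1 36 else PySem.Int.mod k2 36) 36)).getD ' ']
        else acc ++ [(PySem.List.pyGet? str.toList ((y : Nat) : Int)).getD ' '])
      = fun acc i => acc ++ [(if i % 2 = 0 then pvStepA (PySem.Int.mod k1 36) else pvStepA (PySem.Int.mod k2 36)) ((str.toList[i]?).getD ' ')] := by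
    funext acc i
    simp only [PySem.List.pyGet?_natCast]
    have hpar : (PySem.Int.mod ((i : Nat) : Int) 2 = 0) ↔ (i % 2 = 0) := by
      rw [PySem.Int.mod_eq_emod_of_pos (by norm_num : (0:Int) < 2)]
      omega
    by_cases hp : i % 2 = 0
    · simp only [if_pos hp, if_pos (hpar.mpr hp), pvStepA, h36]
      split_ifs <;> simp_all
    · simp only [if_neg hp, if_neg (fun h => hp (hpar.mp h)), pvStepA, h36]
      split_ifs <;> simp_all
  rw [hbody, PySem.List.foldl_append_singleton_eq_map, List.nil_append]
  exact map_range_zz str.toList _ _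

lemma B_norm (str : String) (k1 k2 : Int) :
    toDoubleCesar_alt str k1 k2 =
      String.ofList (pvZZ (pvStepB (PySem.Int.mod k1 36)) (pvStepB (PySem.Int.mod k2 36)) str.toList) := by
  have h36 : ((pvAlpha.length : Nat) : Int) = 36 := by decide
  simp only [toDoubleCesar_alt, h36, slice_even, slice_odd, Option.getD_some]
  congr 1
  set cs := str.toList with hcs
  have ht1 : pvTranslate (pvMaketrans pvAlpha (PySem.List.slice pvAlpha (some (PySem.Int.mod k1 36)) none ++ PySem.List.slice pvAlpha none (some (PySem.Int.mod k1 36)))) (pvEvens cs)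
      = (pvEvens cs).map (pvStepB (PySem.Int.mod k1 36)) := rfl
  have ht2 : pvTranslate (pvMaketrans pvAlpha (PySem.List.slice pvAlpha (some (PySem.Int.mod k2 36)) none ++ PySem.List.slice pvAlpha none (some (PySem.Int.mod k2 36)))) (pvEvens cs.tail)
      = (pvEvens cs.tail).map (pvStepB (PySem.Int.mod k2 36)) := rfl
  rw [ht1, ht2]
  set xs := (pvEvens cs).map (pvStepB (PySem.Int.mod k1 36)) with hxs
  set ys := (pvEvens cs.tail).map (pvStepB (PySem.Int.mod k2 36)) with hys
  have hfold : (fun (acc : List Char) (p : Char × Char) => acc ++ [p.1] ++ [p.2])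
      = fun acc p => acc ++ [p.1, p.2] := by
    funext acc p; simp
  rw [hfold]
  have hflat : ∀ (l : List (Char × Char)), l.foldl (fun acc p => acc ++ [p.1, p.2]) ([] : List Char) = l.flatMap (fun p => [p.1, p.2]) := by
    intro l
    have := PySem.List.foldl_append_eq_flatMap (g := fun p : Char × Char => [p.1, p.2]) (l := l) (acc := [])
    simpa using this
  rw [hflat]
  have hlx : xs.length = (cs.length + 1) / 2 := by
    rw [hxs, List.length_map, pvEvens_length]
  have hly : ys.length = cs.length / 2 := by
    rw [hys, List.length_map, pvEvens_length]
    cases cs <;> simp <;> omega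
  have h1 : ys.length ≤ xs.length := by omega
  have h2 : xs.length ≤ ys.length + 1 := by omega
  rw [inter_spec ' ' xs ys h1 h2]
  rw [hxs, hys]
  exact inter_zz cs _ _

-- ===== VERDICT (by name: the statement is the Claim_ definition above) =====
theorem toDoubleCesar_spec : Claim_equal_toDoubleCesar := by
  intro s k1 k2 _
  unfold Spec_toDoubleCesar
  rw [A_norm, B_norm]
  have h36 : (0:Int) < 36 := by norm_num
  congr 1
  exact (zz_congr _ _ _ _
    (fun c => step_eq _ (PySem.Int.mod_nonneg k1 h36) (PySem.Int.mod_lt k1 h36) c)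
    (fun c => step_eq _ (PySem.Int.mod_nonneg k2 h36) (PySem.Int.mod_lt k2 h36) c) s.toList).symm
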